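-- pv_equiv track=rewrite | github.com/jgfranco/formation | 2023_09/stringSpeedDrill7.py | solution
-- ===== SOURCE A (Python) =====
-- def solution(s):
--     numbers = ['0','1','2','3','4','5','6','7','8', '9']
--
--     newString = []
--     for char in s:
--         if char in numbers:
--             for _ in range(int(char)):
--                 newString.append("1")
--         else:
--             newString.append(char)
--
--     return "".join(newString)
-- ===== SOURCE B (Python) =====
-- def solution(s):
--     # Ten staged whole-string passes, one per digit d, each rewriting every
--     # occurrence of d to a run of d unit digits.  Order is irrelevant:
--     # replacements only introduce the unit digit, whose own pass is the identity.
--     for d in '0123456789':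
--         s = s.replace(d, '1' * int(d))
--     return s
-- ===== Notes on version B (the rewrite author's own statement) =====
-- stated objective: alternative
-- what changed: Replaces A's single character-by-character scan (membership test plus an inner per-digit append loop) by ten staged whole-string str.replace passes, one per digit; this is correct because every replacement string consists only of the unit digit, whose own pass is the identity, so the passes compose to the intended substitution.
import Mathlib
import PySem

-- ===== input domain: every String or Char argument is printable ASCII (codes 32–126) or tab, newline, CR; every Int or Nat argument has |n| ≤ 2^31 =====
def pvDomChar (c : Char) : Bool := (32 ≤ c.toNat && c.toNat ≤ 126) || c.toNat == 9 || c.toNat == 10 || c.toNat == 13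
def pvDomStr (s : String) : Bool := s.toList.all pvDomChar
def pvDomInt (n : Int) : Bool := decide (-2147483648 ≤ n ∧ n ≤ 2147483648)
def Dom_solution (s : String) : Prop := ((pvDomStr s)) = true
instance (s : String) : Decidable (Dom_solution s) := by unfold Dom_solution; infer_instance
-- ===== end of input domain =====

-- B replaces A's single per-character scan (membership test + inner append loop) by ten
-- staged whole-string replace passes, one per digit (objective: alternative).

-- ===== PORT A =====
def solution (s : String) : String :=
  let numbers : List Char := ['0','1','2','3','4','5','6','7','8','9']
  let newString : List String :=
    s.toList.foldl (fun acc char =>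
      if char ∈ numbers then
        -- int(char): exact for char ∈ numbers (ASCII digit), int(char) = char.toNat - 48
        (PySem.List.pyRange 0 ((char.toNat : Int) - 48) 1).foldl (fun a _ => a ++ ["1"]) acc
      else
        acc ++ [String.ofList [char]]) []
  PySem.Str.join "" newString

-- ===== PORT B =====
-- for d in '0123456789': s = s.replace(d, '1' * int(d))   (int(d) = d.toNat - 48, exact on ASCII digits)
def solution_alt (s : String) : String :=
  ("0123456789".toList).foldl
    (fun t d => PySem.Str.replace t (String.ofList [d])
                  (String.ofList (List.replicate (d.toNat - 48) '1'))) s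

-- ===== PRECONDITION & SPEC =====
def Spec_solution (s : String) (out : String) : Prop := out = solution_alt s
instance (s : String) (out : String) : Decidable (Spec_solution s out) := by unfold Spec_solution; infer_instance

-- ===== CLAIM =====
def Claim_equal_solution : Prop := ∀ (s : String), Dom_solution s → Spec_solution s (solution s)

-- ===== LEMMAS AND PROOFS =====

-- join with empty separator is concatenation
theorem pv_join_nil_flatten (ps : List (List Char)) :
    PySem.Chars.join [] ps = ps.flatten := by
  induction ps with
  | nil => simp [PySem.Chars.join_nil]
  | cons p rest ih =>
    cases rest with
    | nil => simp [PySem.Chars.join_singleton]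
    | cons q r => rw [PySem.Chars.join_cons_cons]; simp at ih ⊢; simpa using ih

-- the replacement string for digit d
def pvOnes (d : Char) : List Char := List.replicate (d.toNat - 48) '1'

-- the per-character replacement both programs realise
def pvRep (c : Char) : List Char :=
  if c ∈ (['0','1','2','3','4','5','6','7','8','9'] : List Char)
  then List.replicate (c.toNat - 48) '1' else [c]

-- constant-flatMap is replicate
theorem pv_flat_const {α : Type} (l : List α) :
    l.flatMap (fun _ => (["1"] : List String)) = List.replicate l.length "1" := by
  induction l with
  | nil => simp
  | cons x rest ih => simp [List.replicate_succ, ih]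

-- A's inner loop appends int(char) copies of "1"
theorem pv_inner (n : Int) (acc : List String) :
    (PySem.List.pyRange 0 n 1).foldl (fun a _ => a ++ ["1"]) acc
      = acc ++ List.replicate n.toNat "1" := by
  rw [PySem.List.foldl_append_eq_flatMap, pv_flat_const, PySem.List.length_pyRange_one]
  norm_num

-- A's whole loop, flattened per character
theorem pv_A_chars (l : List Char) (acc : List String) :
    ((l.foldl (fun acc char =>
        if char ∈ (['0','1','2','3','4','5','6','7','8','9'] : List Char) then
          (PySem.List.pyRange 0 ((char.toNat : Int) - 48) 1).foldl (fun a _ => a ++ ["1"]) acc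
        else acc ++ [String.ofList [char]]) acc).map String.toList).flatten
      = (acc.map String.toList).flatten ++ l.flatMap pvRep := by
  induction l generalizing acc with
  | nil => simp
  | cons c rest ih =>
    simp only [List.foldl, List.flatMap_cons]
    by_cases h : c ∈ (['0','1','2','3','4','5','6','7','8','9'] : List Char)
    · rw [if_pos h, pv_inner, ih]
      simp only [List.map_append, List.flatten_append, List.append_assoc]
      congr 2
      fin_cases h <;> decide
    · rw [if_neg h, ih]
      simp [pvRep, h]

-- replace.go for a single-character needle is the obvious per-character substitution
theorem pv_go_single (d : Char) (new : List Char) :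
    ∀ (fuel : Nat) (l acc : List Char), l.length ≤ fuel →
      PySem.Chars.replace.go [d] new fuel l acc
        = acc.reverse ++ l.flatMap (fun c => if c = d then new else [c]) := by
  intro fuel
  induction fuel with
  | zero =>
    intro l acc h
    have : l = [] := List.eq_nil_of_length_eq_zero (Nat.le_zero.mp h)
    subst this; simp [PySem.Chars.replace.go]
  | succ n ih =>
    intro l acc h
    cases l with
    | nil => simp [PySem.Chars.replace.go]
    | cons c t =>
      simp only [PySem.Chars.replace.go]
      by_cases hc : c = d
      · subst hc
        have hpref : ([c] : List Char).isPrefixOf (c :: t) = true := by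
          simp [List.isPrefixOf]
        rw [if_pos hpref]
        have ht : t.length ≤ n := by simpa using h
        have hdrop : List.drop ([c] : List Char).length (c :: t) = t := rfl
        rw [hdrop, ih _ _ ht]
        simp
      · have hpref : ([d] : List Char).isPrefixOf (c :: t) = false := by
          simp [List.isPrefixOf]; exact fun h' => hc h'.symm
        rw [if_neg (by simp [hpref])]
        have ht : t.length ≤ n := by simpa using Nat.le_of_succ_le_succ (by simpa using h)
        rw [ih _ _ ht]
        simp [hc]

-- replace with a single-character needle = flatMap of a pointwise substitution
theorem pv_replace_single (l : List Char) (d : Char) (new : List Char) :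
    PySem.Chars.replace l [d] new
      = l.flatMap (fun c => if c = d then new else [c]) := by
  rw [PySem.Chars.replace]
  simp only [List.isEmpty_cons]
  exact pv_go_single d new l.length l [] (le_refl _)

-- the substitution performed by the passes for the digits in ds
def pvGmap (ds : List Char) (c : Char) : List Char :=
  if c ∈ ds then pvOnes c else [c]

-- a run of '1's is fixed by every later pass
theorem pv_ones_fixed (ds : List Char) (k : Nat) :
    (List.replicate k '1').flatMap (pvGmap ds) = List.replicate k '1' := by
  induction k with
  | zero => simp
  | succ n ih =>
    have h1 : pvGmap ds '1' = ['1'] := by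
      unfold pvGmap pvOnes
      split <;> rfl
    simp [List.replicate_succ, ih, h1]

-- composing the passes for ds realises pvGmap ds in one sweep
theorem pv_fold_replace (ds : List Char) :
    ∀ (s : List Char),
      ds.foldl (fun cs d => PySem.Chars.replace cs [d] (pvOnes d)) s
        = s.flatMap (pvGmap ds) := by
  induction ds with
  | nil =>
    intro s
    have : pvGmap [] = fun c => [c] := funext fun c => by simp [pvGmap]
    simp [this]
  | cons d rest ih =>
    intro s
    simp only [List.foldl]
    rw [ih, pv_replace_single, List.flatMap_assoc]
    congr 1
    funext c
    by_cases hc : c = d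
    · subst hc
      rw [if_pos rfl]
      unfold pvGmap
      rw [if_pos (List.mem_cons_self)]
      exact pv_ones_fixed rest (c.toNat - 48)
    · simp only [if_neg hc]
      unfold pvGmap
      simp [hc]

-- B's string-level fold, moved to the char-list level
theorem pv_B_chars (ds : List Char) :
    ∀ (t : String),
      (ds.foldl (fun t d => PySem.Str.replace t (String.ofList [d])
                   (String.ofList (List.replicate (d.toNat - 48) '1'))) t).toList
        = ds.foldl (fun cs d => PySem.Chars.replace cs [d] (pvOnes d)) t.toList := by
  induction ds with
  | nil => intro t; rfl
  | cons d rest ih =>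
    intro t
    simp only [List.foldl]
    rw [ih]
    congr 1
    rw [PySem.Str.toList_replace]
    simp [pvOnes]

-- ===== VERDICT (by name: the statement is the Claim_ definition above) =====
theorem solution_spec : Claim_equal_solution := by
  intro s _
  unfold Spec_solution solution solution_alt
  apply String.toList_injective
  rw [PySem.Str.toList_join]
  have hsep : ("" : String).toList = ([] : List Char) := rfl
  rw [hsep, pv_join_nil_flatten, pv_A_chars, pv_B_chars, pv_fold_replace]
  have hds : ("0123456789".toList) = (['0','1','2','3','4','5','6','7','8','9'] : List Char) := rfl
  rw [hds]
  simp only [List.map_nil, List.flatten_nil, List.nil_append]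
  congr 1
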